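-- pv_equiv track=rewrite | github.com/nicklave/Progetti_esercizi_unical | Esercizi_python/spi_ssi.py | funzione
-- ===== SOURCE A (Python) =====
-- def funzione(lista):
--     lista2 = []
--     for i in range(len(lista)):
--         ssi = 0
--         spi = 0
--         for j in range(i + 1, len(lista)):
--             ssi += lista[j]
--         for k in range(i - 1, -1, -1):
--             spi += lista[k]
--         if spi > ssi:
--             lista2.append(spi)
--         else:
--             lista2.append(ssi)
--
--     return lista2
-- ===== SOURCE B (Python) =====
-- def funzione(lista):
--     total = sum(lista)
--     out = []
--     pref = 0
--     for x in lista: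
--         suff = total - pref - x
--         out.append(pref if pref > suff else suff)
--         pref += x
--     return out
-- ===== Notes on version B (the rewrite author's own statement) =====
-- stated objective: faster
-- what changed: Replaces the per-index inner loops that re-sum the prefix and suffix with one pass keeping a running prefix sum and the precomputed total, so each element's answer is O(1).
import Mathlib
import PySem

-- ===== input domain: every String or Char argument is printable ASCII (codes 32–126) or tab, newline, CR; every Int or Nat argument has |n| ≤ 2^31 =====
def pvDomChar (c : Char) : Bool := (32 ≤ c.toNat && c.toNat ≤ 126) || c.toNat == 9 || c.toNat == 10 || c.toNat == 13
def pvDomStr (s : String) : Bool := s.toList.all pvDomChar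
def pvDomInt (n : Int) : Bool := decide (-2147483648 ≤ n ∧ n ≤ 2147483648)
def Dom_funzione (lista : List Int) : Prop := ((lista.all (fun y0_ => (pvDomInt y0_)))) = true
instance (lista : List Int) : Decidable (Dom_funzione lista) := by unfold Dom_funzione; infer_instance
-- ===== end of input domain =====

-- B replaces A's quadratic per-index re-summation by a single pass with a running prefix sum (objective: faster).

-- ===== PORT A =====
def funzione (lista : List Int) : List Int :=
  (PySem.List.pyRange 0 (lista.length : Int) 1).foldl (fun lista2 i =>
    let ssi := (PySem.List.pyRange (i + 1) (lista.length : Int) 1).foldl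
      (fun s j => s + PySem.List.pyGetD lista j 0) 0
    let spi := (PySem.List.pyRange (i - 1) (-1) (-1)).foldl
      (fun s k => s + PySem.List.pyGetD lista k 0) 0
    if spi > ssi then lista2 ++ [spi] else lista2 ++ [ssi]) []

-- ===== PORT B =====
def funzione_alt (lista : List Int) : List Int :=
  let total := lista.sum
  (lista.foldl (fun (st : Int × List Int) x =>
    let suff := total - st.1 - x
    (st.1 + x, st.2 ++ [if st.1 > suff then st.1 else suff])) (0, [])).2

-- ===== PRECONDITION & SPEC =====
def Spec_funzione (lista : List Int) (out : List Int) : Prop := out = funzione_alt lista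
instance (lista : List Int) (out : List Int) : Decidable (Spec_funzione lista out) := by unfold Spec_funzione; infer_instance

-- ===== CLAIM (what is proved, stated in full; the proofs are below) =====
def Claim_equal_funzione : Prop := ∀ (lista : List Int), Dom_funzione lista → Spec_funzione lista (funzione lista)

-- ===== LEMMAS AND PROOFS =====

-- reference recursion: element for position with prefix sum p over remaining list
def pvF (p : Int) : List Int → List Int
  | [] => []
  | y :: ys => (if p > ys.sum then p else ys.sum) :: pvF (p + y) ys

-- B equals pvF
theorem pvB_inv (l : List Int) (T p : Int) (acc : List Int) (h : T = p + l.sum) :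
    (l.foldl (fun (st : Int × List Int) x =>
      (st.1 + x, st.2 ++ [if st.1 > T - st.1 - x then st.1 else T - st.1 - x])) (p, acc)).2
    = acc ++ pvF p l := by
  induction l generalizing p acc with
  | nil => simp [pvF]
  | cons y ys ih =>
    simp only [List.foldl_cons, List.sum_cons] at *
    rw [ih (p + y) _ (by omega)]
    have hsuff : T - p - y = ys.sum := by omega
    simp [pvF, hsuff]

-- sum of the elements at indices 0..i-1
theorem pvTakeSum (xs : List Int) : ∀ (i : Nat), i ≤ xs.length →
    ((PySem.List.pyRange 0 (i : Int) 1).map (fun k => PySem.List.pyGetD xs k 0)).sum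
    = (xs.take i).sum := by
  intro i
  induction i with
  | zero => simp [PySem.List.pyRange_one_eq_nil]
  | succ n ih =>
    intro h
    have h1 : ((n : Int)) ≤ ((n : Int) + 1) := by omega
    have : ((n : Int) + 1) = (((n + 1 : Nat)) : Int) := by push_cast; ring
    rw [← this, PySem.List.pyRange_one_succ_right (by omega)]
    have hn : n < xs.length := by omega
    rw [List.map_append, List.sum_append, ih (by omega)]
    have : xs.take (n + 1) = xs.take n ++ [xs[n]] := by
      rw [List.take_add_one]; simp [List.getElem?_eq_getElem hn]
    rw [this, List.sum_append]
    simp [PySem.List.pyGetD_natCast, List.getD_eq_getElem?_getD, List.getElem?_eq_getElem hn]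

-- A's pvF form of the per-index body
theorem pvA_map (xs : List Int) : ∀ (p : Int),
    (List.range xs.length).map (fun k =>
      if p + (xs.take k).sum > (xs.drop (k + 1)).sum then p + (xs.take k).sum
      else (xs.drop (k + 1)).sum) = pvF p xs := by
  induction xs with
  | nil => intro p; simp [pvF]
  | cons y ys ih =>
    intro p
    simp only [List.length_cons, List.range_succ_eq_map, List.map_cons, List.map_map]
    simp only [Function.comp_def, List.take_succ_cons, List.drop_succ_cons, List.take_zero,
      List.drop_zero, List.sum_cons, List.sum_nil]
    rw [pvF]
    congr 1
    · simp
    · rw [← ih (p + y)]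
      apply List.map_congr_left
      intro k _
      simp only [Nat.succ_eq_add_one, ← add_assoc]
    
-- ===== VERDICT (by name: the statement is the Claim_ definition above) =====
-- B unfolds to pvF
theorem pvAlt_eq (lista : List Int) : funzione_alt lista = pvF 0 lista := by
  simp only [funzione_alt]
  rw [pvB_inv lista lista.sum 0 [] (by ring)]
  simp

-- A unfolds to pvF
theorem pvA_eq (lista : List Int) : funzione lista = pvF 0 lista := by
  unfold funzione
  rw [List.foldl_ext _ (fun (lista2 : List Int) (i : Int) => lista2 ++
        [if (PySem.List.pyRange (i - 1) (-1) (-1)).foldl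
              (fun s k => s + PySem.List.pyGetD lista k 0) 0 >
            (PySem.List.pyRange (i + 1) (lista.length : Int) 1).foldl
              (fun s j => s + PySem.List.pyGetD lista j 0) 0
         then (PySem.List.pyRange (i - 1) (-1) (-1)).foldl
              (fun s k => s + PySem.List.pyGetD lista k 0) 0
         else (PySem.List.pyRange (i + 1) (lista.length : Int) 1).foldl
              (fun s j => s + PySem.List.pyGetD lista j 0) 0])
      [] (by intro a b _; simp only []; split <;> rfl)]
  rw [PySem.List.foldl_append_singleton_eq_map, List.nil_append]
  rw [PySem.List.pyRange_one 0 (lista.length : Int)]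
  simp only [Int.sub_zero, Int.toNat_natCast, List.map_map, Function.comp_def]
  rw [← pvA_map lista 0]
  apply List.map_congr_left
  intro k hk
  have hk' : k < lista.length := List.mem_range.mp hk
  have hssi : (PySem.List.pyRange ((0 + (k : Int)) + 1) (lista.length : Int) 1).foldl
      (fun s j => s + PySem.List.pyGetD lista j 0) 0 = (lista.drop (k + 1)).sum := by
    have h01 : (0 + (k : Int)) + 1 = ((k + 1 : Nat) : Int) := by push_cast; ring
    rw [h01, PySem.List.foldl_pyRange_pyGetD' lista 0 (fun s v => s + v) 0 (by positivity)]
    rw [PySem.List.foldl_add, Int.toNat_natCast]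
    simp
  have hspi : (PySem.List.pyRange ((0 + (k : Int)) - 1) (-1) (-1)).foldl
      (fun s j => s + PySem.List.pyGetD lista j 0) 0 = (lista.take k).sum := by
    rw [PySem.List.pyRange_neg_one_eq_reverse]
    have h02 : ((-1 : Int) + 1) = 0 := by ring
    have h03 : (0 + (k : Int)) - 1 + 1 = (k : Int) := by ring
    rw [h02, h03, PySem.List.foldl_add]
    rw [List.map_reverse, List.sum_reverse]
    rw [pvTakeSum lista k (le_of_lt hk')]
    ring
  rw [hssi, hspi]
  simp

-- ===== VERDICT (by name: the statement is the Claim_ definition above) =====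
theorem funzione_spec : Claim_equal_funzione := by
  intro lista _
  unfold Spec_funzione
  rw [pvA_eq, pvAlt_eq]
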